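-- pv_equiv track=rewrite | github.com/kamyu104/LeetCode-Solutions | Python/check-if-word-is-valid-after-substitutions.py | isValid
-- ===== SOURCE A (Python) =====
-- def isValid(S):
--     """
--     :type S: str
--     :rtype: bool
--     """
--     stack = []
--     for i in S:
--         if i == 'c':
--             if stack[-2:] == ['a', 'b']:
--                 stack.pop()
--                 stack.pop()
--             else:
--                 return False
--         else:
--             stack.append(i)
--     return not stack
-- ===== SOURCE B (Python) =====
-- def isValid(S):
--     """
--     :type S: str
--     :rtype: bool
--     """
--     while 'abc' in S:
--         S = S.replace('abc', '')
--     return S == ''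
-- ===== Notes on version B (the rewrite author's own statement) =====
-- stated objective: simpler
-- what changed: Replaced the one-pass character stack with a fixed-point rewriting loop: repeatedly delete all occurrences of the three-letter pattern via str.replace until none remains, then test for the empty string.
import Mathlib
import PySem

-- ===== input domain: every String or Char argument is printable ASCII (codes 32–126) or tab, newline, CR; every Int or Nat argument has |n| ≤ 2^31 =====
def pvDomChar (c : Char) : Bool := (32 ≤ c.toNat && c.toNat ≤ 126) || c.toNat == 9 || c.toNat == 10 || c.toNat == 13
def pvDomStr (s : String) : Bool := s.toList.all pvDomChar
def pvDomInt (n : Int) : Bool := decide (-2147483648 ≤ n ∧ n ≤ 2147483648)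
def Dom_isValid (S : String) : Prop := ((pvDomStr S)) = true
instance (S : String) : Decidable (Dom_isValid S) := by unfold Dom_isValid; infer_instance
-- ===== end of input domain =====

-- B replaces A's one-pass character stack by a fixed-point rewriting loop (repeatedly delete
-- every 'abc' substring with str.replace, then test for the empty string); objective: simpler.

-- ===== PORT A =====
-- Python's list used as a stack (append/pop at the end) is mirrored head-first: push = cons,
-- and the slice test stack[-2:] == ['a','b'] becomes stack.take 2 = ['b','a'] (top first);
-- the two pops become stack.drop 2.
def isValidGo (stack : List Char) : List Char → Bool
  | [] => stack.isEmpty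
  | i :: rest =>
    if i = 'c' then
      if stack.take 2 = ['b', 'a'] then isValidGo (stack.drop 2) rest
      else false
    else isValidGo (i :: stack) rest

def isValid (S : String) : Bool := isValidGo [] S.toList

-- ===== PORT B =====
-- myRep and the two length lemmas are scaffolding for bLoop's termination proof: myRep is one
-- str.replace('abc','') pass, and replace_go_eq_myRep identifies it with PySem.Chars.replace.
def myRep : List Char → List Char
  | 'a' :: 'b' :: 'c' :: t => myRep t
  | c :: t => c :: myRep t
  | [] => []

theorem myRep_cons (c : Char) (t : List Char) (h : ∀ u, ¬(c = 'a' ∧ t = 'b'::'c'::u)) :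
    myRep (c::t) = c :: myRep t := by
  rw [myRep.eq_def]; split
  · rename_i u heq; injection heq with h1 h2; exact absurd ⟨h1, h2⟩ (h u)
  · rename_i heq; injection heq with h1 h2; subst h1 h2; rfl
  · rename_i heq; cases heq

theorem length_myRep_le (l : List Char) : (myRep l).length ≤ l.length := by
  fun_induction myRep <;> simp_all; omega

theorem length_myRep_lt (l : List Char) (h : ['a','b','c'] <:+: l) :
    (myRep l).length < l.length := by
  fun_induction myRep with
  | case1 t ih => have := length_myRep_le t; simp; omega
  | case2 c t hm ih =>
      rcases List.infix_cons_iff.mp h with h3 | h3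
      · obtain ⟨u, hu⟩ := h3
        injection hu.symm with h1 h2
        exact (hm u h1 (by simpa using h2)).elim
      · simpa using ih h3
  | case3 => simp at h

theorem replace_go_eq_myRep (fuel : Nat) (l acc : List Char) (hf : l.length ≤ fuel) :
    PySem.Chars.replace.go ['a','b','c'] [] fuel l acc = acc.reverse ++ myRep l := by
  induction fuel generalizing l acc with
  | zero =>
      have : l = [] := by cases l <;> simp_all
      subst this; rw [PySem.Chars.replace.go]; simp [myRep]
  | succ f ih =>
      cases l with
      | nil => rw [PySem.Chars.replace.go]; simp [myRep]; omega
      | cons c t =>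
          rw [PySem.Chars.replace.go]
          by_cases hp : ['a','b','c'].isPrefixOf (c :: t) = true
          · obtain ⟨u, hu⟩ := List.isPrefixOf_iff_prefix.mp hp
            have hc : c :: t = 'a' :: 'b' :: 'c' :: u := hu.symm
            simp only [hp, if_true]
            rw [hc] at hf ⊢; simp only [List.length_cons] at hf
            rw [show List.drop (['a','b','c'] : List Char).length ('a'::'b'::'c'::u) = u from rfl]
            rw [ih u _ (by omega)]
            rw [show myRep ('a'::'b'::'c'::u) = myRep u from rfl]; simp
          · simp only [hp, if_false, Bool.false_eq_true]
            rw [ih t (c :: acc) (by simp at hf ⊢; omega)]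
            rw [myRep_cons c t (by
              intro u ⟨h1, h2⟩; subst h1 h2; simp [List.isPrefixOf_iff_prefix] at hp)]
            simp

theorem length_pyReplaceAbc_lt (l : List Char) (h : PySem.Chars.isIn ['a','b','c'] l = true) :
    (PySem.Chars.replace l ['a','b','c'] []).length < l.length := by
  have := length_myRep_lt l ((PySem.Chars.isIn_iff_infix _ _).mp h)
  unfold PySem.Chars.replace
  simpa [replace_go_eq_myRep l.length l [] le_rfl] using this

-- while 'abc' in S: S = S.replace('abc', '')
def bLoop (l : List Char) : List Char :=
  if h : PySem.Chars.isIn ['a','b','c'] l = true then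
    bLoop (PySem.Chars.replace l ['a','b','c'] [])
  else l
termination_by l.length
decreasing_by exact length_pyReplaceAbc_lt l h

-- return S == ''
def isValid_alt (S : String) : Bool := bLoop S.toList == []

-- ===== PRECONDITION & SPEC =====
def Spec_isValid (S : String) (out : Bool) : Prop := out = isValid_alt S
instance (S : String) (out : Bool) : Decidable (Spec_isValid S out) := by unfold Spec_isValid; infer_instance

-- ===== CLAIM (what is proved, stated in full; the proofs are below) =====
def Claim_equal_isValid : Prop := ∀ (S : String), Dom_isValid S → Spec_isValid S (isValid S)

-- ===== LEMMAS AND PROOFS =====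

-- One step of A's stack automaton when it keeps going instead of rejecting ('c' with a bad
-- stack is pushed; a pushed 'c' is never popped, so the stack can never empty again).
def step (st : List Char) (i : Char) : List Char :=
  if i = 'c' ∧ st.take 2 = ['b', 'a'] then st.drop 2 else i :: st

def normF (st l : List Char) : List Char := l.foldl step st

theorem normF_cons (st : List Char) (i : Char) (l : List Char) :
    normF st (i :: l) = normF (step st i) l := rfl

theorem c_mem_step (st : List Char) (i : Char) (h : 'c' ∈ st) : 'c' ∈ step st i := by
  unfold step; split
  · rename_i hc
    obtain ⟨s', hs⟩ : ∃ s', st = 'b' :: 'a' :: s' := by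
      cases st with
      | nil => simp at hc
      | cons x t => cases t with
        | nil => simp at hc
        | cons y s' => simp at hc; exact ⟨s', by simp [hc.2]⟩
    subst hs; simp_all
  · simp [h]

theorem normF_ne_nil_of_c_mem (l st : List Char) (h : 'c' ∈ st) : normF st l ≠ [] := by
  induction l generalizing st with
  | nil => intro he; rw [show normF st [] = st from rfl] at he; subst he; simp at h
  | cons i rest ih => rw [normF_cons]; exact ih _ (c_mem_step st i h)

theorem isValidGo_eq_normF (l st : List Char) : isValidGo st l = (normF st l).isEmpty := by
  induction l generalizing st with
  | nil => simp [isValidGo, normF, List.foldl]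
  | cons i rest ih =>
      rw [normF_cons]
      by_cases hi : i = 'c'
      · subst hi
        by_cases hba : st.take 2 = ['b', 'a']
        · rw [show isValidGo st ('c'::rest) = isValidGo (st.drop 2) rest from by
            simp [isValidGo, hba]]
          rw [show step st 'c' = st.drop 2 from by simp [step, hba]]
          exact ih _
        · rw [show isValidGo st ('c'::rest) = false from by simp [isValidGo, hba]]
          rw [show step st 'c' = 'c' :: st from by simp [step, hba]]
          have := normF_ne_nil_of_c_mem rest ('c' :: st) (by simp)
          simp [this]
      · rw [show isValidGo st (i::rest) = isValidGo (i::st) rest from by simp [isValidGo, hi]]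
        rw [show step st i = i :: st from by simp [step, hi]]
        exact ih _

theorem normF_myRep (l : List Char) : ∀ st, normF st (myRep l) = normF st l := by
  fun_induction myRep with
  | case1 t ih =>
      intro st
      rw [show normF st ('a'::'b'::'c'::t) = normF st t from by
        simp [normF_cons, step]]
      exact ih st
  | case2 c t hm ih =>
      intro st
      rw [normF_cons, normF_cons]
      exact ih _
  | case3 => intro st; rfl

theorem normF_no_occurrence (l : List Char) :
    ∀ st, ¬ (['a','b','c'] <:+: (st.reverse ++ l)) → normF st l = l.reverse ++ st := by
  induction l with
  | nil => intro st _; rfl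
  | cons i rest ih =>
      intro st h
      rw [normF_cons]
      by_cases hc : i = 'c' ∧ st.take 2 = ['b', 'a']
      · obtain ⟨hi, hba⟩ := hc
        obtain ⟨s', hs⟩ : ∃ s', st = 'b' :: 'a' :: s' := by
          cases st with
          | nil => simp at hba
          | cons x t => cases t with
            | nil => simp at hba
            | cons y s' => simp at hba; exact ⟨s', by simp [hba.1, hba.2]⟩
        exact absurd ⟨s'.reverse, rest, by subst hs hi; simp⟩ h
      · rw [show step st i = i :: st from by unfold step; rw [if_neg hc]]
        rw [ih (i :: st) (by simpa using h)]
        simp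

theorem normF_bLoop (l : List Char) : normF [] (bLoop l) = normF [] l := by
  fun_induction bLoop with
  | case1 l h ih =>
      rw [ih]
      unfold PySem.Chars.replace
      simp only [replace_go_eq_myRep l.length l [] le_rfl, List.reverse_nil, List.nil_append,
        List.isEmpty_cons, Bool.false_eq_true, if_false]
      exact normF_myRep l []
  | case2 l h => rfl

theorem bLoop_no_occurrence (l : List Char) : ¬ (['a','b','c'] <:+: bLoop l) := by
  fun_induction bLoop with
  | case1 l h ih => exact ih
  | case2 l h => exact (PySem.Chars.isIn_eq_false_iff _ _).mp (by simpa using h)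

-- ===== VERDICT (by name: the statement is the Claim_ definition above) =====
theorem isValid_spec : Claim_equal_isValid := by
  intro S _
  show isValid S = isValid_alt S
  unfold isValid isValid_alt
  rw [isValidGo_eq_normF, ← normF_bLoop]
  rw [normF_no_occurrence (bLoop S.toList) [] (by simpa using bLoop_no_occurrence S.toList)]
  simp
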